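-- pv_equiv track=rewrite | github.com/kim-jang-hyun/table_rag | table_rag/table/normalizer.py | combine_header_rows
-- ===== SOURCE A (Python) =====
-- from typing import List
--
-- def combine_header_rows(row0: List[str], row1: List[str]) -> List[str]:
--     """Merge two header rows into one combined header row.
--
--     Merging rules (applied per column):
--     - parent == child (rowspan)          → keep one value
--     - parent only                        → use parent
--     - child only                         → use child
--     - both differ (colspan)              → "parent_child" (e.g. "매출_국내")
--     - parent is empty (colspan carryover)→ inherit the previous parent value
--     """
--     combined = []
--     last_parent = ""
--     for i, (parent, child) in enumerate(zip(row0, row1)):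
--         parent, child = parent.strip(), child.strip()
--         effective_parent = parent if parent else last_parent
--         if parent:
--             last_parent = parent
--
--         if effective_parent == child:
--             combined.append(effective_parent or f"col{i + 1}")
--         elif not child:
--             combined.append(effective_parent or f"col{i + 1}")
--         elif not effective_parent:
--             combined.append(child)
--         else:
--             combined.append(f"{effective_parent}_{child}")
--     return combined
-- ===== SOURCE B (Python) =====
-- def _merge(i, ep, child):
--     c = child.strip()
--     if ep == c or not c:
--         return ep or f"col{i + 1}"
--     if not ep:
--         return c
--     return f"{ep}_{c}"
--
-- def combine_header_rows(row0, row1):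
--     """Segment-based merge: precompute the boundary indices where a new parent
--     starts, then emit each segment of columns with its parent read directly by
--     index — no carried state at all."""
--     n = min(len(row0), len(row1))
--     parents = [c.strip() for c in row0[:n]]
--     # boundary indices: column 0, every column whose parent cell is non-empty, and n
--     edges = [0] + [i for i, p in enumerate(parents) if p] + [n]
--     out = []
--     for lo, hi in zip(edges, edges[1:]):
--         ep = parents[lo] if lo < n and parents[lo] else ""
--         for i in range(lo, hi):
--             out.append(_merge(i, ep, row1[i]))
--     return out
-- ===== Notes on version B (the rewrite author's own statement) =====
-- stated objective: alternative
-- what changed: Replaces A's single stateful scan (carrying last_parent while merging) by a stateless segment decomposition: precompute the list of boundary indices where a non-empty parent starts, then emit each [lo,hi) segment with its parent read directly by index parents[lo] - no carried state at all.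
import Mathlib
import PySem

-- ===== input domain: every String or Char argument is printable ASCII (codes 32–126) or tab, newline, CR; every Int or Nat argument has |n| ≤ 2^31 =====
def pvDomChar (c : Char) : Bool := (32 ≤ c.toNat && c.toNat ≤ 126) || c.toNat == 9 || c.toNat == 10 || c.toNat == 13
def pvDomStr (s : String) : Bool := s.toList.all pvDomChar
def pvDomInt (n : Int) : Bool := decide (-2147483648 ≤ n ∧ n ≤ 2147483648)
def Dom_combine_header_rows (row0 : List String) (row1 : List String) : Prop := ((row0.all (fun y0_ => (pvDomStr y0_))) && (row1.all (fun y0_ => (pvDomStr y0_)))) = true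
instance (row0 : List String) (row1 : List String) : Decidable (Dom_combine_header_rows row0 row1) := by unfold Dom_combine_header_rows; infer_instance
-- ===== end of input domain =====

-- B replaces A's single stateful scan (carrying last_parent) by a stateless segment
-- decomposition: precompute the boundary indices where a non-empty parent starts, then
-- emit each segment with its parent read directly by index (objective: alternative).

-- ===== PORT A =====
-- loop body of A, recursing over the zipped rows with the loop state (i, last_parent)
def combineGoA (i : Int) (last : String) : List (String × String) → List String
  | [] => []
  | (parent0, child0) :: rest =>
    let parent := PySem.Str.strip parent0
    let child := PySem.Str.strip child0
    let effective_parent := if parent ≠ "" then parent else last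
    let last' := if parent ≠ "" then parent else last
    let entry :=
      if effective_parent == child then
        (if effective_parent ≠ "" then effective_parent else "col" ++ PySem.Int.toStr (i + 1))
      else if child == "" then
        (if effective_parent ≠ "" then effective_parent else "col" ++ PySem.Int.toStr (i + 1))
      else if effective_parent == "" then child
      else effective_parent ++ "_" ++ child
    entry :: combineGoA (i + 1) last' rest

def combine_header_rows (row0 : List String) (row1 : List String) : List String :=
  combineGoA 0 "" (List.zip row0 row1)

-- ===== PORT B =====
-- _merge of Source B
def mergeCell (i : Int) (ep : String) (child : String) : String :=
  let c := PySem.Str.strip child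
  if ep == c || c == "" then (if ep ≠ "" then ep else "col" ++ PySem.Int.toStr (i + 1))
  else if ep == "" then c
  else ep ++ "_" ++ c

-- Source B: boundary indices (edges), then one inner append loop per segment; the
-- pyGetD lookups parents[lo] / row1[i] are always evaluated in range
def combine_header_rows_alt (row0 : List String) (row1 : List String) : List String :=
  let n : Int := min (row0.length : Int) (row1.length : Int)
  let parents : List String := (PySem.List.slice row0 none (some n)).map PySem.Str.strip
  let edges : List Int :=
    0 :: (((PySem.List.enumerate parents 0).filter (fun p => p.2 != "")).map Prod.fst ++ [n])
  (List.zip edges edges.tail).foldl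
    (fun out lohi =>
      let ep : String :=
        if lohi.1 < n ∧ PySem.List.pyGetD parents lohi.1 "" ≠ "" then
          PySem.List.pyGetD parents lohi.1 "" else ""
      (PySem.List.pyRange lohi.1 lohi.2 1).foldl
        (fun out2 i => out2 ++ [mergeCell i ep (PySem.List.pyGetD row1 i "")]) out)
    []

-- ===== PRECONDITION & SPEC =====
def Spec_combine_header_rows (row0 : List String) (row1 : List String) (out : List String) : Prop := out = combine_header_rows_alt row0 row1
instance (row0 : List String) (row1 : List String) (out : List String) : Decidable (Spec_combine_header_rows row0 row1 out) := by unfold Spec_combine_header_rows; infer_instance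

-- ===== CLAIM (what is proved, stated in full; the proofs are below) =====
def Claim_equal_combine_header_rows : Prop := ∀ (row0 : List String) (row1 : List String), Dom_combine_header_rows row0 row1 → Spec_combine_header_rows row0 row1 (combine_header_rows row0 row1)

-- ===== LEMMAS AND PROOFS =====

-- abbreviations for the pieces of B's port (proof-only)
def pvN (row0 row1 : List String) : Int := min (row0.length : Int) (row1.length : Int)

def pvParents (row0 row1 : List String) : List String :=
  (PySem.List.slice row0 none (some (pvN row0 row1))).map PySem.Str.strip

def epB (row0 row1 : List String) (lo : Int) : String :=
  if lo < pvN row0 row1 ∧ PySem.List.pyGetD (pvParents row0 row1) lo "" ≠ "" then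
    PySem.List.pyGetD (pvParents row0 row1) lo "" else ""

def stepB (row0 row1 : List String) (out : List String) (lohi : Int × Int) : List String :=
  (PySem.List.pyRange lohi.1 lohi.2 1).foldl
    (fun out2 i => out2 ++ [mergeCell i (epB row0 row1 lohi.1) (PySem.List.pyGetD row1 i "")]) out

theorem alt_eq_foldl (row0 row1 : List String) :
    combine_header_rows_alt row0 row1 =
      (List.zip
        (0 :: (((PySem.List.enumerate (pvParents row0 row1) 0).filter (fun p => p.2 != "")).map Prod.fst ++ [pvN row0 row1]))
        ((((PySem.List.enumerate (pvParents row0 row1) 0).filter (fun p => p.2 != "")).map Prod.fst ++ [pvN row0 row1]))).foldl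
        (stepB row0 row1) [] := by
  rfl

-- basic facts about the pieces
theorem pvN_eq (row0 row1 : List String) :
    pvN row0 row1 = ((List.zip row0 row1).length : Int) := by
  rw [pvN, List.length_zip, Nat.cast_min]

theorem pvParents_getD (row0 row1 : List String) (i : Nat)
    (h : i < (List.zip row0 row1).length) :
    (pvParents row0 row1).getD i "" = PySem.Str.strip (row0.getD i "") := by
  have hnn : (0:Int) ≤ pvN row0 row1 := by
    rw [pvN]; positivity
  have hzl : (List.zip row0 row1).length = min row0.length row1.length := List.length_zip
  have htn : (pvN row0 row1).toNat = min row0.length row1.length := by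
    rw [pvN]; omega
  have h0 : i < row0.length := by omega
  have hi : i < (List.take (min row0.length row1.length) row0).length := by
    simp; omega
  rw [pvParents, PySem.List.slice_to _ hnn, htn]
  rw [List.getD_eq_getElem?_getD, List.getElem?_eq_getElem (by simpa using hi),
      List.getD_eq_getElem?_getD, List.getElem?_eq_getElem h0]
  simp [List.getElem_take]

theorem pvParents_length (row0 row1 : List String) :
    (pvParents row0 row1).length = (List.zip row0 row1).length := by
  have hnn : (0:Int) ≤ pvN row0 row1 := by rw [pvN]; positivity
  have htn : (pvN row0 row1).toNat = min row0.length row1.length := by rw [pvN]; omega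
  rw [pvParents, PySem.List.slice_to _ hnn, htn, List.length_map, List.length_take,
      List.length_zip]
  omega

theorem child_getD (row1 : List String) (i : Nat) :
    PySem.List.pyGetD row1 ((i : Nat) : Int) "" = row1.getD i "" := by
  rw [PySem.List.pyGetD_natCast]

-- the head step of A's loop, phrased with B's _merge
set_option maxHeartbeats 1000000 in
theorem goA_cons (i : Int) (last parent child : String) (rest : List (String × String)) :
    combineGoA i last ((parent, child) :: rest) =
      mergeCell i (if PySem.Str.strip parent ≠ "" then PySem.Str.strip parent else last) child ::
        combineGoA (i + 1) (if PySem.Str.strip parent ≠ "" then PySem.Str.strip parent else last) rest := by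
  simp only [combineGoA, mergeCell]
  generalize PySem.Str.strip parent = p
  generalize PySem.Str.strip child = c
  congr 1
  by_cases h1 : (if p ≠ "" then p else last) = c <;>
    by_cases h2 : c = "" <;>
      simp [h1, h2]

-- A's loop over a run of columns whose (stripped) parent cell is empty keeps the
-- carried parent and emits exactly B's per-column merge of that parent
theorem splitRun (row0 row1 : List String) (ep : String) :
    ∀ (d lo : Nat), lo + d ≤ (List.zip row0 row1).length →
    (∀ i : Nat, lo ≤ i → i < lo + d → PySem.Str.strip (row0.getD i "") = "") →
    combineGoA (lo : Int) ep ((List.zip row0 row1).drop lo)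
      = (PySem.List.pyRange (lo : Int) ((lo + d : Nat) : Int) 1).map
          (fun i => mergeCell i ep (PySem.List.pyGetD row1 i ""))
        ++ combineGoA ((lo + d : Nat) : Int) ep ((List.zip row0 row1).drop (lo + d)) := by
  intro d
  induction d with
  | zero =>
    intro lo _ _
    simp [PySem.List.pyRange_one_eq_nil (le_refl _)]
  | succ d ih =>
    intro lo hlen he
    have hzl : (List.zip row0 row1).length = min row0.length row1.length := List.length_zip
    have hlo : lo < (List.zip row0 row1).length := by omega
    have h0 : lo < row0.length := by omega
    have h1 : lo < row1.length := by omega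
    rw [List.drop_eq_getElem_cons hlo, List.getElem_zip, goA_cons]
    have hps : PySem.Str.strip row0[lo] = "" := by
      have := he lo le_rfl (by omega)
      rwa [List.getD_eq_getElem?_getD, List.getElem?_eq_getElem h0] at this
    rw [if_neg (by simp [hps])]
    have hrange : PySem.List.pyRange (lo : Int) ((lo + (d+1) : Nat) : Int) 1
        = (lo : Int) :: PySem.List.pyRange ((lo : Int) + 1) ((lo + (d+1) : Nat) : Int) 1 := by
      exact PySem.List.pyRange_one_cons (by push_cast; omega)
    rw [hrange, List.map_cons]
    have hchild : PySem.List.pyGetD row1 ((lo : Nat) : Int) "" = row1[lo] := by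
      rw [child_getD, List.getD_eq_getElem?_getD, List.getElem?_eq_getElem h1]
      rfl
    rw [hchild, List.cons_append]
    congr 1
    have hc1 : ((lo : Nat) : Int) + 1 = ((lo + 1 : Nat) : Int) := by push_cast; ring
    have hc2 : ((lo + (d+1) : Nat) : Int) = (((lo + 1) + d : Nat) : Int) := by push_cast; ring
    have hc3 : lo + (d + 1) = (lo + 1) + d := by omega
    rw [hc1, hc2, hc3]
    exact ih (lo + 1) (by omega) (fun i hi1 hi2 => he i (by omega) (by omega))

theorem stepB_eval (row0 row1 : List String) (acc : List String) (lo hi : Int) :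
    stepB row0 row1 acc (lo, hi) =
      acc ++ (PySem.List.pyRange lo hi 1).map
        (fun i => mergeCell i (epB row0 row1 lo) (PySem.List.pyGetD row1 i "")) := by
  rw [stepB]
  exact PySem.List.foldl_append_singleton_eq_map _ _ _

theorem epB_lt (row0 row1 : List String) (lo : Nat) (h : lo < (List.zip row0 row1).length) :
    epB row0 row1 (lo : Int) =
      if PySem.Str.strip (row0.getD lo "") ≠ "" then PySem.Str.strip (row0.getD lo "") else "" := by
  have hzl : (List.zip row0 row1).length = min row0.length row1.length := List.length_zip
  have h0 : lo < row0.length := by omega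
  have h1 : lo < row1.length := by omega
  rw [epB, pvN_eq, PySem.List.pyGetD_natCast, pvParents_getD _ _ _ h]
  simp only [Nat.cast_lt]
  by_cases hp : PySem.Str.strip (row0.getD lo "") = "" <;> simp [hp, hzl, h0, h1]

-- the main correspondence: folding B's segment step over the remaining boundary
-- pairs equals A's loop resumed at column lo with carried parent `last`
theorem mainFold (row0 row1 : List String) :
    ∀ (st : List Nat) (lo : Nat) (last : String) (acc : List String),
    (∀ s ∈ st, lo ≤ s ∧ s < (List.zip row0 row1).length) →
    st.Pairwise (· < ·) →
    (∀ s ∈ st, PySem.Str.strip (row0.getD s "") ≠ "") →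
    (∀ i : Nat, lo < i → i < (List.zip row0 row1).length →
        PySem.Str.strip (row0.getD i "") ≠ "" → i ∈ st) →
    lo ≤ (List.zip row0 row1).length →
    (lo < (List.zip row0 row1).length → PySem.Str.strip (row0.getD lo "") = "" → last = "") →
    (List.zip ((lo : Int) :: (st.map (fun s : Nat => (s : Int)) ++ [((List.zip row0 row1).length : Int)]))
              (st.map (fun s : Nat => (s : Int)) ++ [((List.zip row0 row1).length : Int)])).foldl
      (stepB row0 row1) acc
      = acc ++ combineGoA (lo : Int) last ((List.zip row0 row1).drop lo) := by
  intro st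
  induction st with
  | nil =>
    intro lo last acc _ _ _ hcov hlo hlast
    have hzl : (List.zip row0 row1).length = min row0.length row1.length := List.length_zip
    have hfold : (List.zip ((lo : Int) :: (List.map (fun s : Nat => (s : Int)) ([] : List Nat) ++
            [((List.zip row0 row1).length : Int)]))
          (List.map (fun s : Nat => (s : Int)) ([] : List Nat) ++
            [((List.zip row0 row1).length : Int)])).foldl (stepB row0 row1) acc
        = stepB row0 row1 acc ((lo : Int), ((List.zip row0 row1).length : Int)) := rfl
    rw [hfold, stepB_eval]
    by_cases hlt : lo < (List.zip row0 row1).length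
    · have hempty : ∀ i : Nat, lo < i → i < (List.zip row0 row1).length →
          PySem.Str.strip (row0.getD i "") = "" := by
        intro i h1 h2
        by_contra hne
        exact absurd (hcov i h1 h2 hne) (List.not_mem_nil)
      by_cases hp : PySem.Str.strip (row0.getD lo "") = ""
      · -- empty parent at lo: ep = "", carried value is ""
        have hl0 : last = "" := hlast hlt hp
        have hsp := splitRun row0 row1 "" ((List.zip row0 row1).length - lo) lo (by omega)
          (by
            intro i hi1 hi2
            rcases Nat.eq_or_lt_of_le hi1 with h | h
            · rw [← h]; exact hp
            · exact hempty i h (by omega))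
        have hco : lo + ((List.zip row0 row1).length - lo) = (List.zip row0 row1).length := by
          omega
        rw [hco] at hsp
        rw [epB_lt _ _ _ hlt, if_neg (by simpa using hp), hl0, hsp, List.drop_length]
        simp [combineGoA]
      · -- non-empty parent at lo
        have h0 : lo < row0.length := by omega
        have h1 : lo < row1.length := by omega
        rw [epB_lt _ _ _ hlt, if_pos hp]
        rw [List.drop_eq_getElem_cons hlt, List.getElem_zip, goA_cons]
        have hpe : PySem.Str.strip row0[lo] = PySem.Str.strip (row0.getD lo "") := by
          rw [List.getD_eq_getElem?_getD, List.getElem?_eq_getElem h0]; rfl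
        rw [hpe, if_pos hp]
        have hsp := splitRun row0 row1 (PySem.Str.strip (row0.getD lo ""))
          ((List.zip row0 row1).length - (lo + 1)) (lo + 1) (by omega)
          (fun i hi1 hi2 => hempty i (by omega) (by omega))
        have hco : (lo + 1) + ((List.zip row0 row1).length - (lo + 1)) =
            (List.zip row0 row1).length := by omega
        rw [hco] at hsp
        have hc1 : ((lo : Nat) : Int) + 1 = ((lo + 1 : Nat) : Int) := by push_cast; ring
        rw [hc1, hsp, List.drop_length]
        rw [PySem.List.pyRange_one_cons (by exact_mod_cast hlt), List.map_cons]
        have hchild : PySem.List.pyGetD row1 ((lo : Nat) : Int) "" = row1[lo] := by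
          rw [child_getD, List.getD_eq_getElem?_getD, List.getElem?_eq_getElem h1]; rfl
        rw [hchild, ← hc1]
        simp [combineGoA]
    · -- lo = length: nothing left
      have heq : lo = (List.zip row0 row1).length := by omega
      rw [heq, List.drop_length, PySem.List.pyRange_one_eq_nil (le_refl _)]
      simp [combineGoA]
  | cons sh rest ih =>
    intro lo last acc hb hsort hnon hcov hlo hlast
    have hzl : (List.zip row0 row1).length = min row0.length row1.length := List.length_zip
    obtain ⟨hls, hsN⟩ := hb sh List.mem_cons_self
    have hrest_lt : ∀ r ∈ rest, sh < r := (List.pairwise_cons.mp hsort).1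
    have hshne : PySem.Str.strip (row0.getD sh "") ≠ "" := hnon sh List.mem_cons_self
    -- instantiate the IH at the next boundary sh
    have ihs : ∀ (last' : String) (acc' : List String),
        (sh < (List.zip row0 row1).length → PySem.Str.strip (row0.getD sh "") = "" → last' = "") →
        (List.zip ((sh : Int) :: (rest.map (fun s : Nat => (s : Int)) ++
              [((List.zip row0 row1).length : Int)]))
            (rest.map (fun s : Nat => (s : Int)) ++ [((List.zip row0 row1).length : Int)])).foldl
          (stepB row0 row1) acc'
          = acc' ++ combineGoA (sh : Int) last' ((List.zip row0 row1).drop sh) := by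
      intro last' acc' hlast'
      refine ih sh last' acc' ?_ (List.pairwise_cons.mp hsort).2 ?_ ?_ (by omega) hlast'
      · intro r hr; exact ⟨Nat.le_of_lt (hrest_lt r hr), (hb r (List.mem_cons_of_mem _ hr)).2⟩
      · intro r hr; exact hnon r (List.mem_cons_of_mem _ hr)
      · intro i hi1 hi2 hne
        rcases List.mem_cons.mp (hcov i (by omega) hi2 hne) with h | h
        · omega
        · exact h
    have hfold : (List.zip ((lo : Int) :: (List.map (fun s : Nat => (s : Int)) (sh :: rest) ++
            [((List.zip row0 row1).length : Int)]))
          (List.map (fun s : Nat => (s : Int)) (sh :: rest) ++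
            [((List.zip row0 row1).length : Int)])).foldl (stepB row0 row1) acc
        = (List.zip ((sh : Int) :: (List.map (fun s : Nat => (s : Int)) rest ++
            [((List.zip row0 row1).length : Int)]))
          (List.map (fun s : Nat => (s : Int)) rest ++
            [((List.zip row0 row1).length : Int)])).foldl (stepB row0 row1)
          (stepB row0 row1 acc ((lo : Int), (sh : Int))) := rfl
    rw [hfold]
    rcases Nat.eq_or_lt_of_le hls with heq | hlt
    · -- lo = sh: empty segment, boundary column handled by the recursive call
      subst heq
      rw [stepB_eval, PySem.List.pyRange_one_eq_nil (le_refl _), List.map_nil, List.append_nil]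
      exact ihs last acc (fun _ hemp => absurd hemp hshne)
    · -- lo < sh: the segment [lo, sh) precedes the next boundary
      have hloN : lo < (List.zip row0 row1).length := by omega
      have hempty : ∀ i : Nat, lo < i → i < sh → PySem.Str.strip (row0.getD i "") = "" := by
        intro i h1 h2
        by_contra hne
        rcases List.mem_cons.mp (hcov i h1 (by omega) hne) with h | h
        · omega
        · exact absurd (hrest_lt i h) (by omega)
      rw [stepB_eval]
      by_cases hp : PySem.Str.strip (row0.getD lo "") = ""
      · have hl0 : last = "" := hlast hloN hp
        have hsp := splitRun row0 row1 "" (sh - lo) lo (by omega)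
          (by
            intro i hi1 hi2
            rcases Nat.eq_or_lt_of_le hi1 with h | h
            · rw [← h]; exact hp
            · exact hempty i h (by omega))
        have hco : lo + (sh - lo) = sh := by omega
        rw [hco] at hsp
        rw [epB_lt _ _ _ hloN, if_neg (by simpa using hp), hl0, hsp]
        rw [ihs "" (acc ++ (PySem.List.pyRange (lo : Int) (sh : Int) 1).map
              (fun i => mergeCell i "" (PySem.List.pyGetD row1 i "")))
            (fun _ hemp => absurd hemp hshne)]
        rw [List.append_assoc]
      · have h0 : lo < row0.length := by omega
        have h1 : lo < row1.length := by omega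
        rw [epB_lt _ _ _ hloN, if_pos hp]
        rw [List.drop_eq_getElem_cons hloN, List.getElem_zip, goA_cons]
        have hpe : PySem.Str.strip row0[lo] = PySem.Str.strip (row0.getD lo "") := by
          rw [List.getD_eq_getElem?_getD, List.getElem?_eq_getElem h0]; rfl
        rw [hpe, if_pos hp]
        have hsp := splitRun row0 row1 (PySem.Str.strip (row0.getD lo ""))
          (sh - (lo + 1)) (lo + 1) (by omega)
          (fun i hi1 hi2 => hempty i (by omega) (by omega))
        have hco : (lo + 1) + (sh - (lo + 1)) = sh := by omega
        rw [hco] at hsp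
        have hc1 : ((lo : Nat) : Int) + 1 = ((lo + 1 : Nat) : Int) := by push_cast; ring
        rw [hc1, hsp]
        rw [ihs (PySem.Str.strip (row0.getD lo ""))
            (acc ++ (PySem.List.pyRange (lo : Int) (sh : Int) 1).map
              (fun i => mergeCell i (PySem.Str.strip (row0.getD lo ""))
                (PySem.List.pyGetD row1 i "")))
            (fun _ hemp => absurd hemp hshne)]
        rw [PySem.List.pyRange_one_cons (by exact_mod_cast hlt), List.map_cons]
        have hchild : PySem.List.pyGetD row1 ((lo : Nat) : Int) "" = row1[lo] := by
          rw [child_getD, List.getD_eq_getElem?_getD, List.getElem?_eq_getElem h1]; rfl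
        rw [hchild]
        simp [List.append_assoc]

-- B's computed boundary list is the filtered range of non-empty parent columns
theorem edges_eq (row0 row1 : List String) :
    ((PySem.List.enumerate (pvParents row0 row1) 0).filter (fun p => p.2 != "")).map Prod.fst
      = ((List.range (List.zip row0 row1).length).filter
          (fun i => PySem.Str.strip (row0.getD i "") != "")).map (fun s : Nat => (s : Int)) := by
  rw [PySem.List.enumerate_eq_map_pyRange (pvParents row0 row1) "", PySem.List.len_eq,
    pvParents_length, PySem.List.pyRange_zero_nat, List.filter_map, List.map_map,
    List.filter_map, List.map_map]
  simp only [Function.comp_def]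
  refine congrArg _ (List.filter_congr ?_)
  intro x hx
  have hxN : x < (List.zip row0 row1).length := List.mem_range.mp hx
  rw [PySem.List.pyGetD_natCast, pvParents_getD _ _ _ hxN]

theorem combine_header_rows_spec : Claim_equal_combine_header_rows := by
  intro row0 row1 _
  unfold Spec_combine_header_rows
  rw [alt_eq_foldl, edges_eq, pvN_eq]
  have hmain := mainFold row0 row1
      ((List.range (List.zip row0 row1).length).filter
        (fun i => PySem.Str.strip (row0.getD i "") != ""))
      0 "" []
      (fun s hs => ⟨Nat.zero_le _, List.mem_range.mp (List.mem_filter.mp hs).1⟩)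
      (List.Pairwise.sublist List.filter_sublist List.pairwise_lt_range)
      (fun s hs => by
        have h2 := (List.mem_filter.mp hs).2
        simpa [bne_iff_ne] using h2)
      (fun i _ h2 hne => List.mem_filter.mpr ⟨List.mem_range.mpr h2, bne_iff_ne.mpr hne⟩)
      (Nat.zero_le _)
      (fun _ _ => rfl)
  simp only [Nat.cast_zero, List.drop_zero, List.nil_append] at hmain
  rw [hmain]
  rfl
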